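-- pv_equiv track=rewrite | github.com/dndcreator/Promethea_Agent | gateway/tool_strategy.py | _tokens
-- ===== SOURCE A (Python) =====
-- from typing import Any, Dict, List, Optional
--
-- def _tokens(text: str) -> List[str]:
--     chars = []
--     for ch in text:
--         if ch.isalnum() or ch in {"_", "."}:
--             chars.append(ch)
--         else:
--             chars.append(" ")
--     return [x for x in "".join(chars).split() if len(x) >= 3]
-- ===== SOURCE B (Python) =====
-- from typing import List
--
-- def _tokens(text: str) -> List[str]:
--     out = []
--     buf = []
--     for ch in text:
--         if ch.isalnum() or ch in {"_", "."}:
--             buf.append(ch)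
--         else:
--             if len(buf) >= 3:
--                 out.append("".join(buf))
--             buf = []
--     if len(buf) >= 3:
--         out.append("".join(buf))
--     return out
-- ===== Notes on version B (the rewrite author's own statement) =====
-- stated objective: alternative
-- what changed: Replaced A's replace-separators/join/split()/list-comprehension pipeline (which materialises the whole normalized string and the full token list) by a single fused scan that buffers the current token and emits it on each separator and at the end, filtering by length inline; no intermediate string is built.
import Mathlib
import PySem

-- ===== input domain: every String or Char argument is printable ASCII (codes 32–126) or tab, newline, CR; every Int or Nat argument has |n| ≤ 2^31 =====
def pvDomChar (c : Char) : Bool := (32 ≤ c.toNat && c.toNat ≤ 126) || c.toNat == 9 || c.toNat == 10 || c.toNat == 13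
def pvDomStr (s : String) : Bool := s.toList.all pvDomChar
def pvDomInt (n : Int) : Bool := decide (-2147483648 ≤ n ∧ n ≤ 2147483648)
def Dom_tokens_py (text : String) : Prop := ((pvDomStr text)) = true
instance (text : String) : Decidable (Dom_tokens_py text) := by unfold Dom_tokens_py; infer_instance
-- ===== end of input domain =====

-- B fuses A's replace-join-split-filter pipeline into one buffered scan over the text (alternative decomposition, same output).

-- ===== PORT A =====
-- A: build a char list replacing separator chars by ' ', then split() it and keep the pieces of length >= 3.
def tokens_py (text : String) : List String :=
  let chars : List Char :=
    text.toList.foldl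
      (fun acc ch =>
        if PySem.Chars.isalnum ch || (ch == '_' || ch == '.') then acc ++ [ch]
        else acc ++ [' '])
      []
  -- "".join(chars) of one-char strings is the char list itself; .split() = PySem.Chars.split₀
  ((PySem.Chars.split₀ chars).filter (fun x => 3 ≤ x.length)).map String.ofList

-- ===== PORT B =====
-- B: single pass over the text, buffering the current token and flushing it (if long enough) on each separator and at the end.
def tokensAltGo : List Char → List Char → List String → List String
  | [], buf, out => if 3 ≤ buf.length then out ++ [String.ofList buf] else out
  | c :: rest, buf, out =>
    if PySem.Chars.isalnum c || (c == '_' || c == '.') then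
      tokensAltGo rest (buf ++ [c]) out
    else if 3 ≤ buf.length then tokensAltGo rest [] (out ++ [String.ofList buf])
    else tokensAltGo rest [] out

def tokens_py_alt (text : String) : List String :=
  tokensAltGo text.toList [] []

-- ===== PRECONDITION & SPEC =====
def Spec_tokens_py (text : String) (out : List String) : Prop := out = tokens_py_alt text
instance (text : String) (out : List String) : Decidable (Spec_tokens_py text out) := by unfold Spec_tokens_py; infer_instance

-- ===== CLAIM (what is proved, stated in full; the proofs are below) =====
def Claim_equal_tokens_py : Prop := ∀ (text : String), Dom_tokens_py text → Spec_tokens_py text (tokens_py text)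

-- ===== LEMMAS AND PROOFS =====

-- the separator-replacement step of A
def pvStep (ch : Char) : Char :=
  if PySem.Chars.isalnum ch || (ch == '_' || ch == '.') then ch else ' '

-- the filter-and-pack tail of A's pipeline
def pvF (ts : List (List Char)) : List String :=
  (ts.filter (fun x => 3 ≤ x.length)).map String.ofList

theorem pvF_append (l t : List (List Char)) : pvF (l ++ t) = pvF l ++ pvF t := by
  simp [pvF]

-- a word character (alnum, '_' or '.') in the ASCII domain is never whitespace
theorem pvGood_not_space (c : Char) (hdom : pvDomChar c = true)
    (hg : (PySem.Chars.isalnum c || (c == '_' || c == '.')) = true) :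
    PySem.Chars.isspace c = false := by
  have h128 : c.toNat < 128 := by
    simp only [pvDomChar, Bool.or_eq_true, Bool.and_eq_true, decide_eq_true_eq, beq_iff_eq] at hdom
    omega
  have key : ∀ n : Fin 128,
      (PySem.Chars.isalnum (Char.ofNat n) || (Char.ofNat n == '_' || Char.ofNat n == '.')) = true →
      PySem.Chars.isspace (Char.ofNat n) = false := by decide
  have h2 := key ⟨c.toNat, h128⟩
  simp only [Char.ofNat_toNat] at h2
  exact h2 hg

-- invariant: A's split-then-filter of the replaced suffix, with buffered prefix `buf`, equals B's scan
theorem pvGo_eq (cs : List Char) (hdom : cs.all pvDomChar = true) :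
    ∀ (buf : List Char) (acc : List (List Char)),
      pvF (PySem.Chars.split₀.go (cs.map pvStep) buf.reverse acc) =
        tokensAltGo cs buf (pvF acc.reverse) := by
  induction cs with
  | nil =>
    intro buf acc
    simp only [List.map_nil, PySem.Chars.split₀.go, tokensAltGo]
    by_cases hb : buf = []
    · subst hb; simp [pvF]
    · have hne : buf.reverse.isEmpty = false := by simp [hb]
      rw [hne]
      simp only [Bool.false_eq_true, if_false, List.reverse_reverse]
      rw [show (buf :: acc).reverse = acc.reverse ++ [buf] by simp, pvF_append]
      by_cases h3 : 3 ≤ buf.length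
      · simp [pvF, h3]
      · simp [pvF, h3]
  | cons c rest ih =>
    intro buf acc
    simp only [List.all_cons, Bool.and_eq_true] at hdom
    obtain ⟨hc, hrest⟩ := hdom
    simp only [List.map_cons, PySem.Chars.split₀.go, tokensAltGo]
    by_cases hg : (PySem.Chars.isalnum c || (c == '_' || c == '.')) = true
    · have hstep : pvStep c = c := by simp [pvStep, hg]
      have hsp : PySem.Chars.isspace c = false := pvGood_not_space c hc hg
      rw [hstep, hsp, hg]
      simp only [Bool.false_eq_true, if_false, if_true]
      rw [show c :: buf.reverse = (buf ++ [c]).reverse by simp]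
      exact ih hrest (buf ++ [c]) acc
    · simp only [Bool.not_eq_true] at hg
      have hstep : pvStep c = ' ' := by simp [pvStep, hg]
      have hsp : PySem.Chars.isspace ' ' = true := by decide
      rw [hstep, hsp, hg]
      simp only [if_true, Bool.false_eq_true, if_false]
      by_cases hb : buf = []
      · subst hb
        simp only [List.reverse_nil, List.isEmpty_nil, if_true, List.length_nil]
        have h := ih hrest [] acc
        simp only [List.reverse_nil] at h
        rw [h]
        norm_num
      · have hne : buf.reverse.isEmpty = false := by simp [hb]
        rw [hne]
        simp only [Bool.false_eq_true, if_false, List.reverse_reverse]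
        have h := ih hrest [] (buf :: acc)
        simp only [List.reverse_nil] at h
        rw [h, show (buf :: acc).reverse = acc.reverse ++ [buf] by simp, pvF_append]
        by_cases h3 : 3 ≤ buf.length
        · simp [pvF, h3]
        · simp [pvF, h3]

-- ===== VERDICT (by name: the statement is the Claim_ definition above) =====
theorem tokens_py_spec : Claim_equal_tokens_py := by
  intro text hdom
  unfold Spec_tokens_py tokens_py tokens_py_alt
  have hfun : (fun (acc : List Char) (ch : Char) =>
      if PySem.Chars.isalnum ch || (ch == '_' || ch == '.') then acc ++ [ch] else acc ++ [' '])
      = fun acc ch => acc ++ [pvStep ch] := by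
    funext acc ch
    by_cases hg : (PySem.Chars.isalnum ch || (ch == '_' || ch == '.')) = true <;>
      simp [pvStep, hg]
  rw [hfun, PySem.List.foldl_append_singleton_eq_map]
  have hdom' : text.toList.all pvDomChar = true := hdom
  have h := pvGo_eq text.toList hdom' [] []
  simpa [PySem.Chars.split₀, pvF] using h
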